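-- pv_equiv track=rewrite | github.com/nd-nuclear-theory/mcscript-ncci | ncci/utils.py | N0_for_nuclide
-- ===== SOURCE A (Python) =====
-- def N0_for_nuclide(nuclide):
--     """Calculate quanta in lowest oscillator configuration for given nuclide.
--
--     Natural parity grade can then be obtained as N0_for_nuclide(nuclide)%2.
--
--     Inspired by spncci lgi::Nsigma0ForNuclide.
--
--     Arguments:
--         nuclide (tuple): (Z,N) for nuclide
--
--     Returns:
--         N0 (int): number of quanta
--     """
--
--     # each major shell eta=2*n+l (for a spin-1/2 fermion) contains (eta+1)*(eta+2) substates
--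
--     N0 = 0;
--     for species_index in (0,1):
--         num_particles = nuclide[species_index]
--         eta=0
--         while(num_particles>0):
--             # add contribution from particles in shell
--             shell_degeneracy = (eta+1)*(eta+2)
--             num_particles_in_shell = min(num_particles,shell_degeneracy)
--             N0 += num_particles_in_shell*eta
--
--             # discard particles in shell
--             num_particles -= num_particles_in_shell
--
--             # move to next shell
--             eta += 1
--
--     return N0
-- ===== SOURCE B (Python) =====
-- def N0_for_nuclide(nuclide):
--     """Calculate quanta in lowest oscillator configuration for given nuclide.
--
--     Closed-form per species: binary-search the number m of completely filled
--     shells (largest m with m*(m+1)*(m+2) <= 3*n), then use the polynomial sums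
--     for the full shells plus the partial-shell term.
--     """
--     def quanta(n):
--         if n <= 0:
--             return 0
--         # largest m with cumulative degeneracy m*(m+1)*(m+2)//3 <= n
--         lo, hi = 0, n
--         while lo < hi:
--             mid = (lo + hi + 1) // 2
--             if mid * (mid + 1) * (mid + 2) <= 3 * n:
--                 lo = mid
--             else:
--                 hi = mid - 1
--         m = lo
--         full = m * (m + 1) * (m + 2) // 3
--         return (m - 1) * m * (m + 1) * (m + 2) // 4 + (n - full) * m
--     return quanta(nuclide[0]) + quanta(nuclide[1])
-- ===== Notes on version B (the rewrite author's own statement) =====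
-- stated objective: alternative
-- what changed: Replaces A's shell-by-shell accumulation loop with a binary search for the number of completely filled shells followed by closed-form polynomial sums (cubic cumulative degeneracy, quartic quanta sum) plus the partial-shell term.
import Mathlib
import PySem

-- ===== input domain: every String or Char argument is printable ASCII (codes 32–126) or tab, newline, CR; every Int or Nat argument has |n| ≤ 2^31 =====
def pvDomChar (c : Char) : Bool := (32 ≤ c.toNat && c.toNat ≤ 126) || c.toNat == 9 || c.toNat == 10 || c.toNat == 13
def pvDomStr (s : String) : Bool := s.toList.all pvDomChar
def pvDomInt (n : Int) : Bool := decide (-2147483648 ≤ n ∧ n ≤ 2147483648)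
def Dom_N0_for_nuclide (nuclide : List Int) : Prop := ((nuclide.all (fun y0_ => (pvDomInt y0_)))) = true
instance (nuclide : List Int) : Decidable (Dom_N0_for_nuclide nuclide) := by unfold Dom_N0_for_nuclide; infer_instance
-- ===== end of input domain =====

-- B replaces A's shell-by-shell accumulation loop by a binary search for the number
-- of completely filled shells plus closed-form polynomial sums (objective: alternative algorithm).

-- ===== PORT A =====
-- inner while loop of A: eta is the shell counter (starts at 0, only incremented, hence
-- Nat); one recursive call per iteration; fuel is a totality guard only (each iteration
-- removes at least one particle, so fuel = num_particles.toNat never runs out)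
def pvShellSum (fuel : Nat) (numParticles : Int) (eta : Nat) : Int :=
  match fuel with
  | 0 => 0
  | fuel + 1 =>
    if numParticles > 0 then
      let d : Int := ((eta : Int) + 1) * ((eta : Int) + 2)
      let k : Int := min numParticles d
      k * (eta : Int) + pvShellSum fuel (numParticles - k) (eta + 1)
    else 0

def N0_for_nuclide (nuclide : List Int) : Int :=
  List.foldl
    (fun N0 speciesIndex =>
      let numParticles := PySem.List.pyGetD nuclide speciesIndex 0
      N0 + pvShellSum numParticles.toNat numParticles 0)
    0 [(0 : Int), 1]

-- ===== PORT B =====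
-- binary search: largest m in [lo, hi] with m*(m+1)*(m+2) <= 3*n; fuel is a totality
-- guard only (the interval shrinks by at least one each round)
def pvCubeSearch (fuel : Nat) (n lo hi : Int) : Int :=
  match fuel with
  | 0 => lo
  | fuel + 1 =>
    if lo < hi then
      let mid := PySem.Int.floordiv (lo + hi + 1) 2
      if mid * (mid + 1) * (mid + 2) ≤ 3 * n then pvCubeSearch fuel n mid hi
      else pvCubeSearch fuel n lo (mid - 1)
    else lo

def pvAltQuanta (n : Int) : Int :=
  if n ≤ 0 then 0
  else
    let m := pvCubeSearch n.toNat n 0 n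
    let full := PySem.Int.floordiv (m * (m + 1) * (m + 2)) 3
    PySem.Int.floordiv ((m - 1) * m * (m + 1) * (m + 2)) 4 + (n - full) * m

def N0_for_nuclide_alt (nuclide : List Int) : Int :=
  pvAltQuanta (PySem.List.pyGetD nuclide 0 0) + pvAltQuanta (PySem.List.pyGetD nuclide 1 0)

-- ===== PRECONDITION & SPEC =====
-- A raises IndexError when the list has fewer than two entries; nothing else raises.
def Pre_N0_for_nuclide (nuclide : List Int) : Prop := 2 ≤ nuclide.length
instance (nuclide : List Int) : Decidable (Pre_N0_for_nuclide nuclide) := by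
  unfold Pre_N0_for_nuclide; infer_instance

def pvWitness_N0_for_nuclide : List Int := [3, 4]

def Spec_N0_for_nuclide (nuclide : List Int) (out : Int) : Prop := out = N0_for_nuclide_alt nuclide
instance (nuclide : List Int) (out : Int) : Decidable (Spec_N0_for_nuclide nuclide out) := by
  unfold Spec_N0_for_nuclide; infer_instance

-- ===== CLAIM (what is proved, stated in full; the proofs are below) =====
def Claim_equal_N0_for_nuclide : Prop := ∀ (nuclide : List Int), Dom_N0_for_nuclide nuclide → Pre_N0_for_nuclide nuclide → Spec_N0_for_nuclide nuclide (N0_for_nuclide nuclide)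

-- ===== LEMMAS AND PROOFS =====

-- cumulative degeneracy of shells eta, eta+1, …, eta+m-1
def pvCum (eta m : Nat) : Int :=
  match m with
  | 0 => 0
  | m + 1 => ((eta : Int) + 1) * ((eta : Int) + 2) + pvCum (eta + 1) m

-- quanta carried by completely filled shells eta, …, eta+m-1
def pvQ (eta m : Nat) : Int :=
  match m with
  | 0 => 0
  | m + 1 => (eta : Int) * (((eta : Int) + 1) * ((eta : Int) + 2)) + pvQ (eta + 1) m

lemma pvCum_nonneg (eta m : Nat) : 0 ≤ pvCum eta m := by
  induction m generalizing eta with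
  | zero => simp [pvCum]
  | succ m ih =>
    have h := ih (eta + 1)
    have h0 : (0 : Int) ≤ (eta : Int) := Int.natCast_nonneg eta
    simp only [pvCum]; nlinarith

-- step lemmas for A's loop
lemma pvShellSum_succ (f : Nat) (n : Int) (eta : Nat) (h : 0 < n) :
    pvShellSum (f + 1) n eta = min n (((eta : Int) + 1) * ((eta : Int) + 2)) * (eta : Int) +
      pvShellSum f (n - min n (((eta : Int) + 1) * ((eta : Int) + 2))) (eta + 1) := by
  simp [pvShellSum, h]

lemma pvShellSum_nonpos (f : Nat) (n : Int) (eta : Nat) (h : ¬ 0 < n) : pvShellSum f n eta = 0 := by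
  cases f <;> simp [pvShellSum, h]

-- A's loop in closed state form: if exactly m shells from eta on are full
lemma pvShellSum_eq (m : Nat) : ∀ (eta : Nat) (n : Int) (fuel : Nat), 0 ≤ n → n.toNat ≤ fuel →
    pvCum eta m ≤ n → n < pvCum eta (m + 1) →
    pvShellSum fuel n eta = pvQ eta m + (n - pvCum eta m) * ((eta : Int) + m) := by
  induction m with
  | zero =>
    intro eta n fuel hn hf h0 h1
    simp only [pvCum, pvQ] at *
    by_cases h : 0 < n
    · obtain ⟨f, rfl⟩ : ∃ f, fuel = f + 1 := ⟨fuel - 1, by omega⟩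
      have hmin : min n (((eta : Int) + 1) * ((eta : Int) + 2)) = n := by omega
      rw [pvShellSum_succ f n eta h, hmin, pvShellSum_nonpos _ _ _ (by omega)]
      push_cast; ring
    · have hn0 : n = 0 := by omega
      rw [pvShellSum_nonpos fuel n eta h, hn0]; ring
  | succ m ih =>
    intro eta n fuel hn hf h0 h1
    have hc : pvCum eta (m + 1) = ((eta : Int) + 1) * ((eta : Int) + 2) + pvCum (eta + 1) m := rfl
    have hc2 : pvCum eta (m + 1 + 1) = ((eta : Int) + 1) * ((eta : Int) + 2) + pvCum (eta + 1) (m + 1) := rfl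
    have hcn := pvCum_nonneg (eta + 1) m
    have hd : (2 : Int) ≤ ((eta : Int) + 1) * ((eta : Int) + 2) := by
      have : (0 : Int) ≤ (eta : Int) := Int.natCast_nonneg eta
      nlinarith
    have h : 0 < n := by omega
    obtain ⟨f, rfl⟩ : ∃ f, fuel = f + 1 := ⟨fuel - 1, by omega⟩
    have hmin : min n (((eta : Int) + 1) * ((eta : Int) + 2)) = ((eta : Int) + 1) * ((eta : Int) + 2) :=
      min_eq_right (by omega)
    rw [pvShellSum_succ f n eta h, hmin,
      ih (eta + 1) (n - ((eta : Int) + 1) * ((eta : Int) + 2)) f (by omega) (by omega) (by omega) (by omega)]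
    have hq : pvQ eta (m + 1) = (eta : Int) * (((eta : Int) + 1) * ((eta : Int) + 2)) + pvQ (eta + 1) m := rfl
    rw [hq, hc]
    push_cast; ring

-- closed form for the cumulative degeneracy of the first m shells
lemma pvCum_snoc (m : Nat) : ∀ eta : Nat,
    pvCum eta (m + 1) = pvCum eta m + ((eta : Int) + m + 1) * ((eta : Int) + m + 2) := by
  induction m with
  | zero => intro eta; simp [pvCum]
  | succ m ih =>
    intro eta
    have h1 : pvCum eta (m + 1 + 1) = ((eta : Int) + 1) * ((eta : Int) + 2) + pvCum (eta + 1) (m + 1) := rfl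
    have h2 : pvCum eta (m + 1) = ((eta : Int) + 1) * ((eta : Int) + 2) + pvCum (eta + 1) m := rfl
    rw [h1, h2, ih (eta + 1)]
    push_cast; ring

lemma pvQ_snoc (m : Nat) : ∀ eta : Nat,
    pvQ eta (m + 1) = pvQ eta m + ((eta : Int) + m) * ((eta : Int) + m + 1) * ((eta : Int) + m + 2) := by
  induction m with
  | zero => intro eta; simp [pvQ]; ring
  | succ m ih =>
    intro eta
    have h1 : pvQ eta (m + 1 + 1) = (eta : Int) * (((eta : Int) + 1) * ((eta : Int) + 2)) + pvQ (eta + 1) (m + 1) := rfl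
    have h2 : pvQ eta (m + 1) = (eta : Int) * (((eta : Int) + 1) * ((eta : Int) + 2)) + pvQ (eta + 1) m := rfl
    rw [h1, h2, ih (eta + 1)]
    push_cast; ring

lemma pvCum_closed (m : Nat) : 3 * pvCum 0 m = (m : Int) * (m + 1) * (m + 2) := by
  induction m with
  | zero => simp [pvCum]
  | succ m ih =>
    rw [pvCum_snoc m 0]
    push_cast at *
    nlinarith [ih]

lemma pvQ_closed (m : Nat) : 4 * pvQ 0 m = ((m : Int) - 1) * m * (m + 1) * (m + 2) := by
  induction m with
  | zero => simp [pvQ]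
  | succ m ih =>
    rw [pvQ_snoc m 0]
    push_cast at *
    nlinarith [ih]

-- step lemmas for B's binary search
lemma pvCubeSearch_succ_lt (f : Nat) (n lo hi : Int) (h : lo < hi) :
    pvCubeSearch (f + 1) n lo hi =
      if PySem.Int.floordiv (lo + hi + 1) 2 * (PySem.Int.floordiv (lo + hi + 1) 2 + 1) *
          (PySem.Int.floordiv (lo + hi + 1) 2 + 2) ≤ 3 * n then
        pvCubeSearch f n (PySem.Int.floordiv (lo + hi + 1) 2) hi
      else pvCubeSearch f n lo (PySem.Int.floordiv (lo + hi + 1) 2 - 1) := by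
  simp [pvCubeSearch, h]

lemma pvCubeSearch_ge (f : Nat) (n lo hi : Int) (h : ¬ lo < hi) : pvCubeSearch f n lo hi = lo := by
  cases f <;> simp [pvCubeSearch, h]

-- binary-search invariant: the result m satisfies f(m) ≤ 3n < f(m+1) and lo ≤ m ≤ hi
lemma pvCubeSearch_spec (n : Int) : ∀ (fuel : Nat) (lo hi : Int), (hi - lo).toNat ≤ fuel → lo ≤ hi →
    lo * (lo + 1) * (lo + 2) ≤ 3 * n → 3 * n < (hi + 1) * (hi + 2) * (hi + 3) →
    lo ≤ pvCubeSearch fuel n lo hi ∧ pvCubeSearch fuel n lo hi ≤ hi ∧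
      pvCubeSearch fuel n lo hi * (pvCubeSearch fuel n lo hi + 1) * (pvCubeSearch fuel n lo hi + 2) ≤ 3 * n ∧
      3 * n < (pvCubeSearch fuel n lo hi + 1) * (pvCubeSearch fuel n lo hi + 2) * (pvCubeSearch fuel n lo hi + 3) := by
  intro fuel
  induction fuel with
  | zero =>
    intro lo hi hf hle hlo hhi
    have : lo = hi := by omega
    subst this
    exact ⟨le_refl _, le_refl _, hlo, hhi⟩
  | succ f ih =>
    intro lo hi hf hle hlo hhi
    by_cases hlt : lo < hi
    · have hb := PySem.Int.floordiv_two_mid_bounds (lo := lo + 1) (hi := hi) (by omega)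
      rw [show lo + 1 + hi = lo + hi + 1 by ring] at hb
      rw [pvCubeSearch_succ_lt f n lo hi hlt]
      set μ := PySem.Int.floordiv (lo + hi + 1) 2 with hμ
      split_ifs with hcond
      · obtain ⟨i1, i2, i3, i4⟩ := ih μ hi (by omega) (by omega) hcond hhi
        exact ⟨by omega, i2, i3, i4⟩
      · have hmid : 3 * n < (μ - 1 + 1) * (μ - 1 + 2) * (μ - 1 + 3) := by
          have heq : (μ - 1 + 1) * (μ - 1 + 2) * (μ - 1 + 3) = μ * (μ + 1) * (μ + 2) := by ring
          omega
        obtain ⟨i1, i2, i3, i4⟩ := ih lo (μ - 1) (by omega) (by omega) hlo hmid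
        exact ⟨i1, by omega, i3, i4⟩
    · rw [pvCubeSearch_ge (f + 1) n lo hi hlt]
      have : lo = hi := by omega
      subst this
      exact ⟨le_refl _, le_refl _, hlo, hhi⟩

lemma floordiv_three_cancel (c : Int) : PySem.Int.floordiv (3 * c) 3 = c := by
  rw [PySem.Int.floordiv_eq_ediv_of_pos (by omega)]
  omega

lemma floordiv_four_cancel (c : Int) : PySem.Int.floordiv (4 * c) 4 = c := by
  rw [PySem.Int.floordiv_eq_ediv_of_pos (by omega)]
  omega

-- per-species agreement
lemma pvAltQuanta_eq (n : Int) : pvAltQuanta n = pvShellSum n.toNat n 0 := by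
  by_cases hn : n ≤ 0
  · rw [pvAltQuanta, if_pos hn, pvShellSum_nonpos _ n 0 (by omega)]
  · push_neg at hn
    have hhi : 3 * n < (n + 1) * (n + 2) * (n + 3) := by
      nlinarith [mul_pos hn hn, mul_pos (mul_pos hn hn) hn]
    obtain ⟨h0m, hmn, hfle, hflt⟩ :=
      pvCubeSearch_spec n n.toNat 0 n (by omega) (by omega) (by norm_num; omega) hhi
    rw [pvAltQuanta, if_neg (by omega : ¬ n ≤ 0)]
    set m := pvCubeSearch n.toNat n 0 n with hm
    obtain ⟨M, hM⟩ : ∃ M : Nat, m = (M : Int) := ⟨m.toNat, by omega⟩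
    have hcum : 3 * pvCum 0 M = m * (m + 1) * (m + 2) := by rw [hM]; exact pvCum_closed M
    have hcum1 : 3 * pvCum 0 (M + 1) = (m + 1) * (m + 2) * (m + 3) := by
      have := pvCum_closed (M + 1)
      rw [hM]; push_cast at this ⊢; linarith
    have hq : 4 * pvQ 0 M = (m - 1) * m * (m + 1) * (m + 2) := by rw [hM]; exact pvQ_closed M
    have hshell := pvShellSum_eq M 0 n n.toNat (by omega) (by omega) (by omega) (by omega)
    show PySem.Int.floordiv ((m - 1) * m * (m + 1) * (m + 2)) 4 +
        (n - PySem.Int.floordiv (m * (m + 1) * (m + 2)) 3) * m = pvShellSum n.toNat n 0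
    rw [← hcum, ← hq, floordiv_three_cancel, floordiv_four_cancel, hshell, hM]
    push_cast
    ring

-- ===== VERDICT (by name: the statement is the Claim_ definition above) =====
theorem N0_for_nuclide_spec : Claim_equal_N0_for_nuclide := by
  intro nuclide _ _
  unfold Spec_N0_for_nuclide N0_for_nuclide N0_for_nuclide_alt
  simp only [List.foldl]
  rw [pvAltQuanta_eq, pvAltQuanta_eq]
  ring
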